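-- pv_equiv track=rewrite | github.com/2425-4chif-syp/2425-4chif-syp-01-projekte-2025-4chif-syp-LeoTrick | PROXY_BRIDGE/bridgebase-protocol/src/bridge/interpret_log.py | split_and_format_raw
-- ===== SOURCE A (Python) =====
-- suit_order   = ['S', 'H', 'C', 'D']
--
-- def split_and_format_raw(raw: str):
--     """ PBN → ['S8','S7',…] """
--     result, suit = [], ''
--     for ch in raw:
--         if ch in suit_order:
--             suit = ch
--         else:
--             result.append(suit + ch)
--     return result
-- ===== SOURCE B (Python) =====
-- def split_and_format_raw(raw: str):
--     """ PBN -> ['S8','S7',...] : segment-based scan (runs between suit letters)."""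
--     def run(s):
--         # split s into (longest prefix of non-suit chars, remainder)
--         k = 0
--         while k < len(s) and s[k] not in 'SHCD':
--             k += 1
--         return s[:k], s[k:]
--
--     pre, rest = run(raw)
--     out = [c for c in pre]           # leading ranks get no suit prefix
--     while rest:
--         suit, rest = rest[0], rest[1:]
--         ranks, rest = run(rest)
--         out.extend(suit + c for c in ranks)
--     return out
-- ===== Notes on version B (the rewrite author's own statement) =====
-- stated objective: alternative
-- what changed: Replaced the char-by-char state machine that carries the last seen suit letter across the scan with a segment-based scan that splits the string into runs of non-suit characters between suit letters and emits each run prefixed by its preceding suit.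
import Mathlib
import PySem

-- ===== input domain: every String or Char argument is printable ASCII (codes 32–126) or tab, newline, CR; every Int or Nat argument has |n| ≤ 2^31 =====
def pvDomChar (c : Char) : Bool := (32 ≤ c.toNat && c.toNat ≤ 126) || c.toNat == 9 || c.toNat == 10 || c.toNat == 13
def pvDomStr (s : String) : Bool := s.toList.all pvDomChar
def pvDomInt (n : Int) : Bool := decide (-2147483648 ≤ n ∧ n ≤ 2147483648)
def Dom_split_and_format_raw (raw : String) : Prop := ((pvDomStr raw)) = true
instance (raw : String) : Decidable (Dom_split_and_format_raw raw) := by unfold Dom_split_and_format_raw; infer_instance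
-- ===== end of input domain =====

-- B replaces A's char-by-char state machine with a segment-based scan (runs of ranks between suit letters); same O(n) cost, alternative structure.

-- ===== PORT A =====
def suit_order : List String := ["S", "H", "C", "D"]

def split_and_format_raw (raw : String) : List String :=
  (raw.toList.foldl (fun (st : List String × String) ch =>
      if String.ofList [ch] ∈ suit_order then (st.1, String.ofList [ch])
      else (st.1 ++ [String.ofList (st.2.toList ++ [ch])], st.2)) ([], "")).1

-- ===== PORT B =====
def isSuit (c : Char) : Bool := c == 'S' || c == 'H' || c == 'C' || c == 'D'

-- the trailing segments: head of the list is a suit letter, followed by its run of ranks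
def altChunks : List Char → List String
  | [] => []
  | c :: rest =>
    (rest.takeWhile (fun x => !isSuit x)).map (fun x => String.ofList [c, x])
      ++ altChunks (rest.dropWhile (fun x => !isSuit x))
termination_by l => l.length
decreasing_by
  simp only [List.length_cons]
  exact Nat.lt_succ_of_le (List.length_dropWhile_le _ _)

def split_and_format_raw_alt (raw : String) : List String :=
  let cs := raw.toList
  (cs.takeWhile (fun x => !isSuit x)).map (fun x => String.ofList [x])
    ++ altChunks (cs.dropWhile (fun x => !isSuit x))

-- ===== PRECONDITION & SPEC =====
def Spec_split_and_format_raw (raw : String) (out : List String) : Prop := out = split_and_format_raw_alt raw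
instance (raw : String) (out : List String) : Decidable (Spec_split_and_format_raw raw out) := by unfold Spec_split_and_format_raw; infer_instance

-- ===== CLAIM (what is proved, stated in full; the proofs are below) =====
def Claim_equal_split_and_format_raw : Prop := ∀ (raw : String), Dom_split_and_format_raw raw → Spec_split_and_format_raw raw (split_and_format_raw raw)

-- ===== LEMMAS AND PROOFS =====

-- A's loop, written as a recursive interpretation (suit = current state)
def gA (suit : String) : List Char → List String
  | [] => []
  | c :: rest =>
    if String.ofList [c] ∈ suit_order then gA (String.ofList [c]) rest
    else String.ofList (suit.toList ++ [c]) :: gA suit rest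

theorem foldl_eq_gA (cs : List Char) (acc : List String) (suit : String) :
    (cs.foldl (fun (st : List String × String) ch =>
      if String.ofList [ch] ∈ suit_order then (st.1, String.ofList [ch])
      else (st.1 ++ [String.ofList (st.2.toList ++ [ch])], st.2)) (acc, suit)).1
    = acc ++ gA suit cs := by
  induction cs generalizing acc suit with
  | nil => simp [gA]
  | cons c rest ih =>
    by_cases h : String.ofList [c] ∈ suit_order
    · simp only [List.foldl_cons, gA, if_pos h]
      exact ih _ _
    · simp only [List.foldl_cons, gA, if_neg h]
      rw [ih]; simp


theorem mem_suit_order_iff (c : Char) : (String.ofList [c] ∈ suit_order) ↔ isSuit c = true := by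
  constructor
  · intro hm
    simp only [suit_order, List.mem_cons, List.not_mem_nil, or_false] at hm
    rcases hm with h1 | h1 | h1 | h1 <;>
      (have h2 := congrArg String.toList h1; simp at h2; simp [isSuit, h2])
  · intro hs
    simp only [isSuit, Bool.or_eq_true, beq_iff_eq] at hs
    rcases hs with ((rfl | rfl) | rfl) | rfl <;> decide

theorem gA_eq_chunks (cs : List Char) (suit : String) :
    gA suit cs
      = (cs.takeWhile (fun x => !isSuit x)).map (fun x => String.ofList (suit.toList ++ [x]))
        ++ altChunks (cs.dropWhile (fun x => !isSuit x)) := by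
  induction cs generalizing suit with
  | nil => simp [gA, altChunks]
  | cons c rest ih =>
    by_cases h : isSuit c
    · have hm : String.ofList [c] ∈ suit_order := (mem_suit_order_iff c).2 h
      simp only [gA, if_pos hm, List.takeWhile_cons, List.dropWhile_cons, h,
        Bool.not_true, ih]
      simp [altChunks]
    · have hm : ¬ String.ofList [c] ∈ suit_order := fun hc => h ((mem_suit_order_iff c).1 hc)
      simp only [gA, if_neg hm, List.takeWhile_cons, List.dropWhile_cons, h,
        Bool.not_false, ih]
      simp

-- ===== VERDICT (by name: the statement is the Claim_ definition above) =====
theorem split_and_format_raw_spec : Claim_equal_split_and_format_raw := by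
  intro raw _
  unfold Spec_split_and_format_raw split_and_format_raw split_and_format_raw_alt
  rw [foldl_eq_gA, gA_eq_chunks]
  simp
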